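-- pv_equiv track=rewrite | github.com/sweep7125/rulesets | .ci/domainset_ops.py | render_xray
-- ===== SOURCE A (Python) =====
-- from typing import List, Tuple, Set, Dict, Iterable
--
-- def render_xray(suffixes: Set[str], fulls: Set[str]) -> List[str]:
--     items = [("full", b) for b in fulls] + [("domain", b) for b in suffixes]
--     rank = {"full": 0, "domain": 1}
--     def label_count(d: str) -> int:
--         return d.count(".") + 1 if d else 0
--     items.sort(key=lambda t: (rank[t[0]], label_count(t[1]), t[1]))
--     out: List[str] = []
--     for k, b in items:
--         if k == "full":
--             out.append(f"full:{b}")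
--         else:
--             out.append(b)
--     return out
-- ===== SOURCE B (Python) =====
-- def render_xray(suffixes, fulls):
--     def label_count(d):
--         return d.count(".") + 1 if d else 0
--     key = lambda b: (label_count(b), b)
--     return [f"full:{b}" for b in sorted(fulls, key=key)] + sorted(suffixes, key=key)
-- ===== Notes on version B (the rewrite author's own statement) =====
-- stated objective: simpler
-- what changed: Drops the tagged-union list and the rank dict: the two inputs are sorted independently by (label_count, name) and the formatted 'full:' block is concatenated before the plain suffix block.
import Mathlib
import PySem

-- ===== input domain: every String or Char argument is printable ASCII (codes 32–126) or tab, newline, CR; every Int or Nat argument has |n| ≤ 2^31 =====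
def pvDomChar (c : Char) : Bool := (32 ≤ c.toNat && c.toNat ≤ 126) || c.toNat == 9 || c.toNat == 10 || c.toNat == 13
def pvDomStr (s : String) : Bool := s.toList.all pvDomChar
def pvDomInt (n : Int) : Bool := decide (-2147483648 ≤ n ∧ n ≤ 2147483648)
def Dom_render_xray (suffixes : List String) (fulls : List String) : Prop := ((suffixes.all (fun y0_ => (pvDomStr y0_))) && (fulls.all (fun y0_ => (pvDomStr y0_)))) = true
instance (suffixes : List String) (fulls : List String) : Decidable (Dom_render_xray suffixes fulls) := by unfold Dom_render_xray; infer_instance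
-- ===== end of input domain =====

-- B replaces A's combined tagged list + rank dict by two independent sorts (fulls, then
-- suffixes) concatenated; objective: simpler.

-- shared local helper of both Pythons: label_count(d) = d.count(".") + 1 if d else 0
def rxLabelCount (d : String) : Int :=
  if d ≠ "" then (PySem.Str.count d "." : Int) + 1 else 0

-- ===== PORT A =====
-- Python's tuple key (rank, label_count, b) is ported as the lexicographic product
-- ℤ ×ₗ (ℤ ×ₗ String) (exact: Python compares tuples lexicographically).
-- rank[t[0]] is ported with getD 0; exact here since every tag is "full" or "domain".
def render_xray (suffixes : List String) (fulls : List String) : List String :=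
  let items : List (String × String) :=
    fulls.map (fun b => ("full", b)) ++ suffixes.map (fun b => ("domain", b))
  let rank : PySem.Dict String Int :=
    ((PySem.Dict.empty).insert "full" 0).insert "domain" 1
  let items2 := PySem.List.sorted items
    (fun t => toLex (rank.getD t.1 0, toLex (rxLabelCount t.2, t.2)) : String × String → ℤ ×ₗ (ℤ ×ₗ String))
  items2.foldl (fun out t => out ++ [if t.1 == "full" then "full:" ++ t.2 else t.2]) []

-- ===== PORT B =====
def render_xray_alt (suffixes : List String) (fulls : List String) : List String :=
  let key : String → ℤ ×ₗ String := fun b => toLex (rxLabelCount b, b)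
  (PySem.List.sorted fulls key).map (fun b => "full:" ++ b) ++ PySem.List.sorted suffixes key

-- ===== PRECONDITION & SPEC =====
def Spec_render_xray (suffixes : List String) (fulls : List String) (out : List String) : Prop := out = render_xray_alt suffixes fulls
instance (suffixes : List String) (fulls : List String) (out : List String) : Decidable (Spec_render_xray suffixes fulls out) := by unfold Spec_render_xray; infer_instance

-- ===== CLAIM (what is proved, stated in full; the proofs are below) =====
def Claim_equal_render_xray : Prop := ∀ (suffixes : List String) (fulls : List String), Dom_render_xray suffixes fulls → Spec_render_xray suffixes fulls (render_xray suffixes fulls)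

-- ===== LEMMAS AND PROOFS =====

-- an injective "super-key" on tagged pairs that refines A's sort key on the items that occur
def rxKey (t : String × String) : ℤ ×ₗ (String ×ₗ (ℤ ×ₗ String)) :=
  toLex ((if t.1 = "full" then 0 else 1), toLex (t.1, toLex (rxLabelCount t.2, t.2)))

theorem rxKey_injective : Function.Injective rxKey := by
  intro a b h
  unfold rxKey at h
  simp only [Equiv.apply_eq_iff_eq, Prod.mk.injEq] at h
  exact Prod.ext h.2.1 h.2.2.2

theorem rxRank_full :
    ((((PySem.Dict.empty).insert "full" (0:Int)).insert "domain" 1).getD "full" 0) = 0 := by decide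

theorem rxRank_domain :
    ((((PySem.Dict.empty).insert "full" (0:Int)).insert "domain" 1).getD "domain" 0) = 1 := by decide

-- A's sort key implies the super-key order on items whose tag is "full" or "domain"
theorem rxKey_le_of_keyA_le (a b : String × String)
    (ha : a.1 = "full" ∨ a.1 = "domain") (hb : b.1 = "full" ∨ b.1 = "domain")
    (h : (toLex (((((PySem.Dict.empty).insert "full" (0:Int)).insert "domain" 1).getD a.1 0), toLex (rxLabelCount a.2, a.2)) : ℤ ×ₗ (ℤ ×ₗ String))
       ≤ toLex (((((PySem.Dict.empty).insert "full" (0:Int)).insert "domain" 1).getD b.1 0), toLex (rxLabelCount b.2, b.2))) :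
    rxKey a ≤ rxKey b := by
  unfold rxKey
  rcases ha with ha | ha <;> rcases hb with hb | hb <;>
    simp only [ha, hb, rxRank_full, rxRank_domain] at h ⊢ <;>
    rw [Prod.Lex.le_iff] at h ⊢ <;> simp_all <;>
    exact Prod.Lex.le_iff.mpr (Or.inr ⟨rfl, h⟩)

theorem rxKey_pairwise_sortedA (suffixes fulls : List String) :
    List.Pairwise (fun a b => rxKey a ≤ rxKey b)
      (PySem.List.sorted
        (fulls.map (fun b => ("full", b)) ++ suffixes.map (fun b => ("domain", b)))
        (fun t => toLex (((((PySem.Dict.empty).insert "full" (0:Int)).insert "domain" 1).getD t.1 0), toLex (rxLabelCount t.2, t.2)) : String × String → ℤ ×ₗ (ℤ ×ₗ String))) := by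
  have hp := PySem.List.sorted_pairwise
    (fulls.map (fun b => ("full", b)) ++ suffixes.map (fun b => ("domain", b)))
    (fun t => toLex (((((PySem.Dict.empty).insert "full" (0:Int)).insert "domain" 1).getD t.1 0), toLex (rxLabelCount t.2, t.2)) : String × String → ℤ ×ₗ (ℤ ×ₗ String))
  refine hp.imp_of_mem (fun {a b} hma hmb hab => ?_)
  have tag : ∀ t : String × String,
      t ∈ PySem.List.sorted
        (fulls.map (fun b => ("full", b)) ++ suffixes.map (fun b => ("domain", b)))
        (fun t => toLex (((((PySem.Dict.empty).insert "full" (0:Int)).insert "domain" 1).getD t.1 0), toLex (rxLabelCount t.2, t.2)) : String × String → ℤ ×ₗ (ℤ ×ₗ String)) →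
      t.1 = "full" ∨ t.1 = "domain" := by
    intro t ht
    have := (PySem.List.sorted_perm _ _ _).mem_iff.mp ht
    rcases List.mem_append.mp this with h | h <;>
      rcases List.mem_map.mp h with ⟨x, _, rfl⟩ <;> simp
  exact rxKey_le_of_keyA_le a b (tag a hma) (tag b hmb) hab

theorem rxKey_pairwise_target (suffixes fulls : List String) :
    List.Pairwise (fun a b => rxKey a ≤ rxKey b)
      ((PySem.List.sorted fulls (fun b => toLex (rxLabelCount b, b) : String → ℤ ×ₗ String)).map (fun b => ("full", b))
        ++ (PySem.List.sorted suffixes (fun b => toLex (rxLabelCount b, b) : String → ℤ ×ₗ String)).map (fun b => ("domain", b))) := by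
  rw [List.pairwise_append]
  refine ⟨?_, ?_, ?_⟩
  · rw [List.pairwise_map]
    refine (PySem.List.sorted_pairwise fulls (fun b => toLex (rxLabelCount b, b) : String → ℤ ×ₗ String)).imp
      (fun {x y} h => ?_)
    unfold rxKey
    rw [Prod.Lex.le_iff]; right
    refine ⟨rfl, ?_⟩
    rw [Prod.Lex.le_iff]; right
    exact ⟨rfl, h⟩
  · rw [List.pairwise_map]
    refine (PySem.List.sorted_pairwise suffixes (fun b => toLex (rxLabelCount b, b) : String → ℤ ×ₗ String)).imp
      (fun {x y} h => ?_)
    unfold rxKey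
    rw [Prod.Lex.le_iff]; right
    refine ⟨rfl, ?_⟩
    rw [Prod.Lex.le_iff]; right
    exact ⟨rfl, h⟩
  · intro a ha b hb
    rcases List.mem_map.mp ha with ⟨x, _, rfl⟩
    rcases List.mem_map.mp hb with ⟨y, _, rfl⟩
    unfold rxKey
    rw [Prod.Lex.le_iff]
    left
    simp

theorem rxSorted_eq (suffixes fulls : List String) :
    PySem.List.sorted
      (fulls.map (fun b => ("full", b)) ++ suffixes.map (fun b => ("domain", b)))
      (fun t => toLex (((((PySem.Dict.empty).insert "full" (0:Int)).insert "domain" 1).getD t.1 0), toLex (rxLabelCount t.2, t.2)) : String × String → ℤ ×ₗ (ℤ ×ₗ String))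
    = (PySem.List.sorted fulls (fun b => toLex (rxLabelCount b, b) : String → ℤ ×ₗ String)).map (fun b => ("full", b))
        ++ (PySem.List.sorted suffixes (fun b => toLex (rxLabelCount b, b) : String → ℤ ×ₗ String)).map (fun b => ("domain", b)) := by
  refine PySem.List.eq_of_perm_of_pairwise_le_of_injective rxKey rxKey_injective ?_
    (rxKey_pairwise_sortedA suffixes fulls) (rxKey_pairwise_target suffixes fulls)
  exact (PySem.List.sorted_perm _ _ _).trans
    (List.Perm.append
      ((PySem.List.sorted_perm fulls _ false).symm.map _)
      ((PySem.List.sorted_perm suffixes _ false).symm.map _))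

-- ===== VERDICT (by name: the statement is the Claim_ definition above) =====
theorem render_xray_spec : Claim_equal_render_xray := by
  intro suffixes fulls _
  unfold Spec_render_xray render_xray render_xray_alt
  simp only []
  rw [rxSorted_eq suffixes fulls,
      PySem.List.foldl_append_singleton_eq_map
        (fun t : String × String => if t.1 == "full" then "full:" ++ t.2 else t.2)]
  simp [List.map_map, Function.comp_def]
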